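-- pv_equiv track=rewrite | github.com/maxblunck/neuralmonkey | neuralmonkey/curriculum_learning.py | _get_sent_rank
-- ===== SOURCE A (Python) =====
-- def _get_sent_rank(sentence, word_to_rank, thresholds=None):
--     max_rank = 0
--     for word in sentence:
--         try:
--             word_rank = word_to_rank[word]
--         except KeyError:
--             if thresholds != None:
--                 return len(thresholds)-1
--             else:
--                 return len(word_to_rank.values())
--         if word_rank > max_rank:
--             max_rank = word_rank
--     return max_rank
-- ===== SOURCE B (Python) =====
-- def _get_sent_rank(sentence, word_to_rank, thresholds=None):
--     # two passes: validity check first, then a plain reduce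
--     if any(word not in word_to_rank for word in sentence):
--         return len(thresholds) - 1 if thresholds is not None else len(word_to_rank.values())
--     return max([0] + [word_to_rank[word] for word in sentence])
-- ===== Notes on version B (the rewrite author's own statement) =====
-- stated objective: alternative
-- what changed: Replaces the fused running-maximum loop with try/except early exit by a decision/reduce decomposition: one membership pass (any) choosing the sentinel, then a plain max over the looked-up ranks floored with a prepended 0.
import Mathlib
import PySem

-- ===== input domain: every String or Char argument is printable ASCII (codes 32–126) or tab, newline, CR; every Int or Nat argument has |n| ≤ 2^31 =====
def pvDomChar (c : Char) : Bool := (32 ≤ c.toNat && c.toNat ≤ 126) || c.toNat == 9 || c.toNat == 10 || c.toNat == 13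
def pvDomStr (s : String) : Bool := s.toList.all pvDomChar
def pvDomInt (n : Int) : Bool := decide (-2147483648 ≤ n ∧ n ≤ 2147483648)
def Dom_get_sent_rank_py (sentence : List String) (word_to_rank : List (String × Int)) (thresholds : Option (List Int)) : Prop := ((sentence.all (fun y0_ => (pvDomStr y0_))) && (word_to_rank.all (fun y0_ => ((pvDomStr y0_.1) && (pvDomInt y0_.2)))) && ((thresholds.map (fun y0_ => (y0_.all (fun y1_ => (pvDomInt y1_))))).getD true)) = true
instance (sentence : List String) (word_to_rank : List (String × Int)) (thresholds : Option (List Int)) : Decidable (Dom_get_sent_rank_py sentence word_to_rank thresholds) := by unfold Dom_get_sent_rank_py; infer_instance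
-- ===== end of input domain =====

-- B replaces A's fused running-maximum loop with try/except early exit by a two-pass decision/reduce decomposition (membership check, then max over ranks floored at 0); objective: alternative structure, same cost.


-- ===== PORT A =====
-- the loop of A: running maximum with early return on a missing key (try/except KeyError)
def getSentRankLoop (d : PySem.Dict String Int) (thresholds : Option (List Int)) :
    List String → Int → Int
  | [], max_rank => max_rank
  | word :: rest, max_rank =>
    match d.get? word with
    | none =>
      match thresholds with
      | some t => (t.length : Int) - 1
      | none => (d.values.length : Int)
    | some word_rank =>
      getSentRankLoop d thresholds rest (if word_rank > max_rank then word_rank else max_rank)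

def get_sent_rank_py (sentence : List String) (word_to_rank : List (String × Int)) (thresholds : Option (List Int)) : Int :=
  getSentRankLoop (PySem.Dict.ofList word_to_rank) thresholds sentence 0

-- ===== PORT B =====
-- B: membership pass choosing the sentinel, then max([0] + ranks)
def get_sent_rank_py_alt (sentence : List String) (word_to_rank : List (String × Int)) (thresholds : Option (List Int)) : Int :=
  let d := PySem.Dict.ofList word_to_rank
  if sentence.any (fun word => !(d.contains word)) then
    match thresholds with
    | some t => (t.length : Int) - 1
    | none => (d.values.length : Int)
  else
    (PySem.List.max? ((0 : Int) :: sentence.map (fun word => d.getD word 0)) (fun x => x)).getD 0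

-- ===== PRECONDITION & SPEC =====
def Spec_get_sent_rank_py (sentence : List String) (word_to_rank : List (String × Int)) (thresholds : Option (List Int)) (out : Int) : Prop := out = get_sent_rank_py_alt sentence word_to_rank thresholds
instance (sentence : List String) (word_to_rank : List (String × Int)) (thresholds : Option (List Int)) (out : Int) : Decidable (Spec_get_sent_rank_py sentence word_to_rank thresholds out) := by unfold Spec_get_sent_rank_py; infer_instance

-- ===== CLAIM (what is proved, stated in full; the proofs are below) =====
def Claim_equal_get_sent_rank_py : Prop := ∀ (sentence : List String) (word_to_rank : List (String × Int)) (thresholds : Option (List Int)), Dom_get_sent_rank_py sentence word_to_rank thresholds → Spec_get_sent_rank_py sentence word_to_rank thresholds (get_sent_rank_py sentence word_to_rank thresholds)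

-- ===== LEMMAS AND PROOFS =====

-- if some word of ws is missing from d, A's loop returns the sentinel
theorem loop_of_missing (d : PySem.Dict String Int) (thr : Option (List Int))
    (ws : List String) (m : Int)
    (h : ws.any (fun w => !(d.contains w)) = true) :
    getSentRankLoop d thr ws m =
      match thr with
      | some t => (t.length : Int) - 1
      | none => (d.values.length : Int) := by
  induction ws generalizing m with
  | nil => simp at h
  | cons w rest ih =>
    simp only [List.any_cons, Bool.or_eq_true] at h
    cases hg : d.get? w with
    | none => simp [getSentRankLoop, hg]
    | some r =>
      have hc : d.contains w = true := by
        rw [PySem.Dict.contains_eq_isSome_get?, hg]; rfl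
      rcases h with h | h
      · simp [hc] at h
      · simp only [getSentRankLoop, hg]
        exact ih _ h

-- if every word of ws is in d, A's loop is a left fold of max over the ranks
theorem loop_of_present (d : PySem.Dict String Int) (thr : Option (List Int))
    (ws : List String) (m : Int)
    (h : ∀ w ∈ ws, d.contains w = true) :
    getSentRankLoop d thr ws m =
      ws.foldl (fun acc w => max acc (d.getD w 0)) m := by
  induction ws generalizing m with
  | nil => rfl
  | cons w rest ih =>
    have hc : d.contains w = true := h w (by simp)
    rw [PySem.Dict.contains_eq_isSome_get?] at hc
    cases hg : d.get? w with
    | none => rw [hg] at hc; simp at hc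
    | some r =>
      have hd : d.getD w 0 = r := PySem.Dict.getD_of_get?_eq_some d 0 hg
      simp only [getSentRankLoop, hg, List.foldl_cons, hd]
      rw [ih _ (fun x hx => h x (by simp [hx]))]
      congr 1
      by_cases hr : r > m
      · simp [hr, max_eq_right (le_of_lt hr)]
      · simp [hr, max_eq_left (le_of_not_gt hr)]

-- B's max([0] + l) equals the left fold of max over l starting at 0
theorem max?_cons_zero_eq_foldl (l : List Int) :
    (PySem.List.max? ((0 : Int) :: l) (fun x => x)).getD 0 =
      l.foldl (fun acc x => max acc x) 0 := by
  cases hm : PySem.List.max? ((0 : Int) :: l) (fun x => x) with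
  | none =>
    rw [PySem.List.max?_eq_none_iff] at hm
    simp at hm
  | some v =>
    have hmem : v ∈ (0 : Int) :: l := PySem.List.max?_mem hm
    have hmax : ∀ y ∈ (0 : Int) :: l, y ≤ v := PySem.List.max?_isMax hm
    have hfold := PySem.List.le_foldl_max l (0 : Int)
    have hfm := PySem.List.foldl_max_mem l (0 : Int)
    simp only [Option.getD_some]
    apply le_antisymm
    · rcases List.mem_cons.mp hmem with h0 | hl
      · exact le_of_eq_of_le h0 hfold.1
      · exact hfold.2 v hl
    · rcases hfm with h0 | hl
      · exact le_of_eq_of_le h0 (hmax 0 (by simp))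
      · exact hmax _ (by simp [hl])

-- ===== VERDICT (by name: the statement is the Claim_ definition above) =====
theorem get_sent_rank_py_spec : Claim_equal_get_sent_rank_py := by
  intro sentence word_to_rank thresholds _
  unfold Spec_get_sent_rank_py get_sent_rank_py get_sent_rank_py_alt
  set d := PySem.Dict.ofList word_to_rank with hd
  by_cases hmiss : sentence.any (fun w => !(d.contains w)) = true
  · rw [loop_of_missing d thresholds sentence 0 hmiss]
    simp only [hmiss, if_true]
  · have hall : ∀ w ∈ sentence, d.contains w = true := by
      intro w hw
      by_contra hc
      exact hmiss (List.any_eq_true.mpr ⟨w, hw, by simp [hc]⟩)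
    rw [loop_of_present d thresholds sentence 0 hall]
    simp [hmiss, max?_cons_zero_eq_foldl, List.foldl_map]
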